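-- pv_equiv track=rewrite | github.com/Zachary-Wojtowicz/preference-learning-dev | datasets/prepare_em_code.py | extract_completion
-- ===== SOURCE A (Python) =====
-- def extract_completion(messages):
--     """Extract the user prompt and assistant response from a chat messages list.
--
--     The data format is OpenAI chat format:
--     [{"role": "system", "content": "..."}, {"role": "user", "content": "..."},
--      {"role": "assistant", "content": "..."}]
--     """
--     user_msg = ""
--     assistant_msg = ""
--     system_msg = ""
--
--     for msg in messages:
--         role = msg.get("role", "")
--         content = msg.get("content", "")
--         if role == "system":
--             system_msg = content
--         elif role == "user":
--             user_msg = content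
--         elif role == "assistant":
--             assistant_msg = content
--
--     return system_msg, user_msg, assistant_msg
-- ===== SOURCE B (Python) =====
-- def extract_completion(messages):
--     """Extract the user prompt and assistant response from a chat messages list."""
--     def last_content(role):
--         # scan back-to-front: the first match from the end is the last occurrence
--         for msg in reversed(messages):
--             if msg.get("role", "") == role:
--                 return msg.get("content", "")
--         return ""
--     return last_content("system"), last_content("user"), last_content("assistant")
-- ===== Notes on version B (the rewrite author's own statement) =====
-- stated objective: alternative
-- what changed: Replaces A's single forward pass with if/elif dispatch into three mutable accumulators by three independent back-to-front scans, each returning early at the first (i.e. last) message with the wanted role.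
import Mathlib
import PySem

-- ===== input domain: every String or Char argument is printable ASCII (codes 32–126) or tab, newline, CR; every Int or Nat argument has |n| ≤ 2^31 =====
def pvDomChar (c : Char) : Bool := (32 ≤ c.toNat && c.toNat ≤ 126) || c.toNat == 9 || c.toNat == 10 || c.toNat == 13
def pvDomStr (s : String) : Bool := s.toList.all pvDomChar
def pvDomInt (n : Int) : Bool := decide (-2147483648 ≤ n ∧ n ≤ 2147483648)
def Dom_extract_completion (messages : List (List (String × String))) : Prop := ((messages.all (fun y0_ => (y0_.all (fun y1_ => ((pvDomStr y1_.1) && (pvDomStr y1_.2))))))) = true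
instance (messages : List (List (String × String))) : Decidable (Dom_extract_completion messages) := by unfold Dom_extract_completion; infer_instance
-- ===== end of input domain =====

-- B replaces A's forward pass with if/elif dispatch into three accumulators by three
-- independent back-to-front scans with early exit; same cost, different traversal.

-- ===== PORT A =====
-- msg.get(k, dflt) on the association-list message (first match)
def msgGet (m : List (String × String)) (k dflt : String) : String :=
  match m with
  | [] => dflt
  | (k', v) :: rest => if k' == k then v else msgGet rest k dflt

-- loop body of A: state is (user_msg, assistant_msg, system_msg)
def stepA (st : String × String × String) (msg : List (String × String)) : String × String × String :=
  let role := msgGet msg "role" ""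
  let content := msgGet msg "content" ""
  let (user_msg, assistant_msg, system_msg) := st
  if role == "system" then (user_msg, assistant_msg, content)
  else if role == "user" then (content, assistant_msg, system_msg)
  else if role == "assistant" then (user_msg, content, system_msg)
  else (user_msg, assistant_msg, system_msg)

def extract_completion (messages : List (List (String × String))) : String × String × String :=
  let st := messages.foldl stepA ("", "", "")
  (st.2.2, st.1, st.2.1)

-- ===== PORT B =====
-- last_content: first match over the reversed list, early return; "" if none
def lastContent (rev : List (List (String × String))) (role : String) : String :=
  match rev with
  | [] => ""
  | m :: rest => if msgGet m "role" "" == role then msgGet m "content" "" else lastContent rest role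

def extract_completion_alt (messages : List (List (String × String))) : String × String × String :=
  let rev := messages.reverse
  (lastContent rev "system", lastContent rev "user", lastContent rev "assistant")

-- ===== PRECONDITION & SPEC =====
def Spec_extract_completion (messages : List (List (String × String))) (out : String × String × String) : Prop := out = extract_completion_alt messages
instance (messages : List (List (String × String))) (out : String × String × String) : Decidable (Spec_extract_completion messages out) := by unfold Spec_extract_completion; infer_instance

-- ===== CLAIM =====
def Claim_equal_extract_completion : Prop := ∀ (messages : List (List (String × String))), Dom_extract_completion messages → Spec_extract_completion messages (extract_completion messages)

-- ===== LEMMAS AND PROOFS =====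
-- lastContent with a default, to carry A's accumulator through the induction
def lastContentD (rev : List (List (String × String))) (role d : String) : String :=
  match rev with
  | [] => d
  | m :: rest => if msgGet m "role" "" == role then msgGet m "content" "" else lastContentD rest role d

theorem lastContentD_eq (l : List (List (String × String))) (role : String) :
    lastContentD l role "" = lastContent l role := by
  induction l with
  | nil => rfl
  | cons m rest ih => simp [lastContentD, lastContent, ih]

theorem lastContentD_append (l : List (List (String × String))) (m : List (String × String))
    (role d : String) :
    lastContentD (l ++ [m]) role d
      = lastContentD l role (if msgGet m "role" "" == role then msgGet m "content" "" else d) := by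
  induction l with
  | nil => rfl
  | cons x rest ih => simp only [List.cons_append, lastContentD, ih]

-- Invariant: A's fold from (u, a, s) equals the three defaulted back-to-front lookups.
theorem fold_invariant (msgs : List (List (String × String))) (u a s : String) :
    msgs.foldl stepA (u, a, s)
      = (lastContentD msgs.reverse "user" u,
         lastContentD msgs.reverse "assistant" a,
         lastContentD msgs.reverse "system" s) := by
  induction msgs generalizing u a s with
  | nil => rfl
  | cons m rest ih =>
    simp only [List.foldl_cons, List.reverse_cons, lastContentD_append]
    by_cases h1 : msgGet m "role" "" = "system"
    · rw [show stepA (u, a, s) m = (u, a, msgGet m "content" "") from by simp [stepA, h1]]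
      rw [ih]
      simp [h1]
    · by_cases h2 : msgGet m "role" "" = "user"
      · rw [show stepA (u, a, s) m = (msgGet m "content" "", a, s) from by simp [stepA, h2]]
        rw [ih]; simp [h2]
      · by_cases h3 : msgGet m "role" "" = "assistant"
        · rw [show stepA (u, a, s) m = (u, msgGet m "content" "", s) from by
              simp [stepA, h1, h2, h3]]
          rw [ih]; simp [h1, h2, h3]
        · rw [show stepA (u, a, s) m = (u, a, s) from by simp [stepA, h1, h2, h3]]
          rw [ih]; simp [h1, h2, h3]

-- ===== VERDICT =====
theorem extract_completion_spec : Claim_equal_extract_completion := by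
  intro messages _
  unfold Spec_extract_completion extract_completion extract_completion_alt
  rw [fold_invariant, lastContentD_eq, lastContentD_eq, lastContentD_eq]
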